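-- pv_equiv track=rewrite | github.com/fhill2/cm3065_final | ex2/cm3065/exercise2.py | linear_predict_order_2_decode
-- ===== SOURCE A (Python) =====
-- def linear_predict_order_2_decode(residuals: list[int]) -> list[int]:
--     """Decode 2nd order linear prediction residuals"""
--     if len(residuals) < 2:
--         return residuals[:]
--
--     samples = residuals[:2]  # First two are stored as-is
--     for i in range(2, len(residuals)):
--         predicted = 2 * samples[i-1] - samples[i-2]
--         sample = residuals[i] + predicted
--         samples.append(sample)
--     return samples
-- ===== SOURCE B (Python) =====
-- def linear_predict_order_2_decode(residuals: list[int]) -> list[int]: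
--     """Decode 2nd order linear prediction residuals by double integration:
--     first prefix-sum the residuals (from index 2) onto the seed first
--     difference, then prefix-sum those differences onto the second sample."""
--     if len(residuals) < 2:
--         return residuals[:]
--     # pass 1: first differences d[i] = s[i] - s[i-1] for i >= 2
--     deltas = []
--     d = residuals[1] - residuals[0]
--     for r in residuals[2:]:
--         d += r
--         deltas.append(d)
--     # pass 2: integrate the differences into samples
--     out = [residuals[0], residuals[1]]
--     s = residuals[1]
--     for d in deltas:
--         s += d
--         out.append(s)
--     return out
-- ===== Notes on version B (the rewrite author's own statement) =====
-- stated objective: alternative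
-- what changed: Replaces the single-pass second-order recurrence with index lookups samples[i-1]/samples[i-2] by two successive first-order integrations: one pass prefix-sums residuals[2:] onto the seed first difference, a second pass prefix-sums those differences into the sample list, with no indexing into the output.
import Mathlib
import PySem

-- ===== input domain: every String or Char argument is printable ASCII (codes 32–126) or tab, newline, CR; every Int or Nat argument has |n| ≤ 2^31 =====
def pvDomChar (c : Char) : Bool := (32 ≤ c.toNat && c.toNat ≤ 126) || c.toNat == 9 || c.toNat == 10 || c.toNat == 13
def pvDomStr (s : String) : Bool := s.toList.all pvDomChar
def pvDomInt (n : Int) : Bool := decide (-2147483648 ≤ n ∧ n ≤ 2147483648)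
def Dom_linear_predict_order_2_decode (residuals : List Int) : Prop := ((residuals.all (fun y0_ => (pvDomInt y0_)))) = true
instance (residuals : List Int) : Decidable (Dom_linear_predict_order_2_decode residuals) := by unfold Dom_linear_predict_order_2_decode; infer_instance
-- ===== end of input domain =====

-- B decodes by two successive first-order integrations (prefix sums) instead of the
-- indexed second-order recurrence; same cost, different decomposition ("alternative").


-- ===== PORT A =====
def linear_predict_order_2_decode (residuals : List Int) : List Int :=
  if residuals.length < 2 then residuals
  else
    (PySem.List.pyRange 2 (residuals.length : Int) 1).foldl
      (fun samples i =>
        let predicted := 2 * PySem.List.pyGetD samples (i - 1) 0 - PySem.List.pyGetD samples (i - 2) 0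
        let sample := PySem.List.pyGetD residuals i 0 + predicted
        samples ++ [sample])
      (PySem.List.slice residuals none (some 2))

-- ===== PORT B =====
def linear_predict_order_2_decode_alt (residuals : List Int) : List Int :=
  match residuals with
  | r0 :: r1 :: rest =>
    -- pass 1: prefix-sum residuals[2:] onto the seed first difference
    let deltas := (rest.foldl (fun (st : List Int × Int) r =>
        let d := st.2 + r
        (st.1 ++ [d], d)) ([], r1 - r0)).1
    -- pass 2: integrate the differences into samples
    (deltas.foldl (fun (st : List Int × Int) d =>
        let s := st.2 + d
        (st.1 ++ [s], s)) ([r0, r1], r1)).1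
  | _ => residuals

-- ===== PRECONDITION & SPEC =====
def Spec_linear_predict_order_2_decode (residuals : List Int) (out : List Int) : Prop := out = linear_predict_order_2_decode_alt residuals
instance (residuals : List Int) (out : List Int) : Decidable (Spec_linear_predict_order_2_decode residuals out) := by unfold Spec_linear_predict_order_2_decode; infer_instance

-- ===== CLAIM (what is proved, stated in full; the proofs are below) =====
def Claim_equal_linear_predict_order_2_decode : Prop := ∀ (residuals : List Int), Dom_linear_predict_order_2_decode residuals → Spec_linear_predict_order_2_decode residuals (linear_predict_order_2_decode residuals)

-- ===== LEMMAS AND PROOFS =====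

/-- Common reference: the decoded tail after two samples `a, b`. -/
def pvCore : Int → Int → List Int → List Int
  | _, _, [] => []
  | a, b, r :: rs => (r + (2 * b - a)) :: pvCore b (r + (2 * b - a)) rs

/-- Reference for B's first pass: running prefix sums seeded at `d`. -/
def pvDeltas : Int → List Int → List Int
  | _, [] => []
  | d, r :: rs => (d + r) :: pvDeltas (d + r) rs

theorem pvDeltas_fold (rs : List Int) : ∀ (acc : List Int) (d : Int),
    (rs.foldl (fun (st : List Int × Int) r => (st.1 ++ [st.2 + r], st.2 + r)) (acc, d)).1
      = acc ++ pvDeltas d rs := by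
  induction rs with
  | nil => intro acc d; simp [pvDeltas]
  | cons r rs ih => intro acc d; simp [pvDeltas, ih]

theorem pvDeltas_pvDeltas (rs : List Int) : ∀ (a b : Int),
    pvDeltas b (pvDeltas (b - a) rs) = pvCore a b rs := by
  induction rs with
  | nil => intro a b; simp [pvDeltas, pvCore]
  | cons r rs ih =>
    intro a b
    simp only [pvDeltas, pvCore]
    have e2 : b + (b - a + r) = r + (2 * b - a) := by ring
    rw [e2]
    congr 1
    have e1 : b - a + r = (r + (2 * b - a)) - b := by ring
    rw [e1]
    exact ih b (r + (2 * b - a))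

theorem alt_eq_core (r0 r1 : Int) (rest : List Int) :
    linear_predict_order_2_decode_alt (r0 :: r1 :: rest) = r0 :: r1 :: pvCore r0 r1 rest := by
  simp only [linear_predict_order_2_decode_alt]
  rw [pvDeltas_fold, pvDeltas_fold]
  simp only [List.nil_append]
  rw [pvDeltas_pvDeltas]
  simp

theorem getD_append_pair_snd (init : List Int) (a b : Int) :
    (init ++ [a, b]).getD (init.length + 1) 0 = b := by
  simp [List.getD_eq_getElem?_getD]

theorem getD_append_pair_fst (init : List Int) (a b : Int) :
    (init ++ [a, b]).getD init.length 0 = a := by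
  simp [List.getD_eq_getElem?_getD]

theorem loopA (res : List Int) : ∀ (fuel k : Nat) (init : List Int) (a b : Int),
    k = init.length + 2 → res.length = k + fuel →
    (PySem.List.pyRange (k : Int) (res.length : Int) 1).foldl
      (fun samples i =>
        samples ++ [PySem.List.pyGetD res i 0 +
          (2 * PySem.List.pyGetD samples (i - 1) 0 - PySem.List.pyGetD samples (i - 2) 0)])
      (init ++ [a, b])
      = init ++ [a, b] ++ pvCore a b (res.drop k) := by
  intro fuel
  induction fuel with
  | zero =>
    intro k init a b hk hlen
    have h1 : PySem.List.pyRange (k : Int) (res.length : Int) 1 = [] := by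
      apply PySem.List.pyRange_one_eq_nil
      omega
    rw [h1]
    simp [List.drop_eq_nil_of_le (by omega : res.length ≤ k), pvCore]
  | succ fuel ih =>
    intro k init a b hk hlen
    have hkn : (k : Int) < (res.length : Int) := by omega
    rw [PySem.List.pyRange_one_cons hkn, List.foldl_cons]
    have hklt : k < res.length := by omega
    have e1 : (k : Int) - 1 = ((k - 1 : Nat) : Int) := by omega
    have e2 : (k : Int) - 2 = ((k - 2 : Nat) : Int) := by omega
    have hres : PySem.List.pyGetD res (k : Int) 0 = res[k] := by
      simp [PySem.List.pyGetD_natCast, List.getD_eq_getElem?_getD, List.getElem?_eq_getElem hklt]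
    have hb : PySem.List.pyGetD (init ++ [a, b]) ((k : Int) - 1) 0 = b := by
      rw [e1, PySem.List.pyGetD_natCast]
      have : k - 1 = init.length + 1 := by omega
      rw [this, getD_append_pair_snd]
    have ha : PySem.List.pyGetD (init ++ [a, b]) ((k : Int) - 2) 0 = a := by
      rw [e2, PySem.List.pyGetD_natCast]
      have : k - 2 = init.length := by omega
      rw [this, getD_append_pair_fst]
    rw [hres, hb, ha]
    have hstep : (init ++ [a, b]) ++ [res[k] + (2 * b - a)]
        = (init ++ [a]) ++ [b, res[k] + (2 * b - a)] := by simp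
    rw [hstep]
    have hk1 : (k : Int) + 1 = ((k + 1 : Nat) : Int) := by omega
    rw [hk1, ih (k + 1) (init ++ [a]) b (res[k] + (2 * b - a)) (by simp; omega) (by omega)]
    have hdrop : res.drop k = res[k] :: res.drop (k + 1) :=
      List.drop_eq_getElem_cons hklt
    rw [hdrop]
    simp [pvCore]

theorem A_eq_core (r0 r1 : Int) (rest : List Int) :
    linear_predict_order_2_decode (r0 :: r1 :: rest) = r0 :: r1 :: pvCore r0 r1 rest := by
  simp only [linear_predict_order_2_decode]
  rw [if_neg (by simp)]
  have hslice : PySem.List.slice (r0 :: r1 :: rest) none (some 2) = [] ++ [r0, r1] := by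
    simp [PySem.List.slice_to]
  rw [hslice]
  have h2 : ((2 : Nat) : Int) = (2 : Int) := by norm_num
  have := loopA (r0 :: r1 :: rest) rest.length 2 [] r0 r1 (by simp) (by simp; omega)
  rw [h2] at this
  rw [this]
  simp

-- ===== VERDICT (by name: the statement is the Claim_ definition above) =====
theorem linear_predict_order_2_decode_spec : Claim_equal_linear_predict_order_2_decode := by
  intro residuals _
  unfold Spec_linear_predict_order_2_decode
  match residuals with
  | [] => rfl
  | [r0] => rfl
  | r0 :: r1 :: rest => rw [A_eq_core, alt_eq_core]
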